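-- pv_equiv track=rewrite | github.com/Stralax/RINS-TASK2 | dis_tutorial7/scripts/nlp_test.py | extract_bird_name
-- ===== SOURCE A (Python) =====
-- COMMON_BIRDS = [
--     "002.laysan_albatross", "012.yellow_headed_blackbird", "014.indigo_bunting",
--     "025.pelagic_cormorant", "029.american_crow", "033.yellow_billed_cuckoo",
--     "035.purple_finch", "042.vermilion_flycatcher", "048.european_goldfinch",
--     "050.eared_grebe", "059.california_gull", "068.ruby_throated_hummingbird",
--     "073.blue_jay", "081.pied_kingfisher", "095.baltimore_oriole",
--     "101.white_pelican", "106.horned_puffin", "108.white_necked_raven",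
--     "112.great_grey_shrike", "118.house_sparrow", "134.cape_glossy_starling",
--     "138.tree_swallow", "144.common_tern", "191.red_headed_woodpecker"
-- ]
--
-- BIRD_DISPLAY_NAMES = {
--     "002.laysan_albatross": "Laysan Albatross",
--     "012.yellow_headed_blackbird": "Yellow Headed Blackbird",
--     "014.indigo_bunting": "Indigo Bunting",
--     "025.pelagic_cormorant": "Pelagic Cormorant",
--     "029.american_crow": "American Crow",
--     "033.yellow_billed_cuckoo": "Yellow Billed Cuckoo",
--     "035.purple_finch": "Purple Finch",
--     "042.vermilion_flycatcher": "Vermilion Flycatcher",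
--     "048.european_goldfinch": "European Goldfinch",
--     "050.eared_grebe": "Eared Grebe",
--     "059.california_gull": "California Gull",
--     "068.ruby_throated_hummingbird": "Ruby Throated Hummingbird",
--     "073.blue_jay": "Blue Jay",
--     "081.pied_kingfisher": "Pied Kingfisher",
--     "095.baltimore_oriole": "Baltimore Oriole",
--     "101.white_pelican": "White Pelican",
--     "106.horned_puffin": "Horned Puffin",
--     "108.white_necked_raven": "White Necked Raven",
--     "112.great_grey_shrike": "Great Grey Shrike",
--     "118.house_sparrow": "House Sparrow",
--     "134.cape_glossy_starling": "Cape Glossy Starling",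
--     "138.tree_swallow": "Tree Swallow",
--     "144.common_tern": "Common Tern",
--     "191.red_headed_woodpecker": "Red Headed Woodpecker"
-- }
--
-- def extract_bird_name(response):
--     """Extract the bird name from a response."""
--     if not response:
--         return None
--
--     response = response.lower()
--
--     # First try exact matches with bird IDs
--     for bird in COMMON_BIRDS:
--         bird_clean = bird.lower()
--         if bird_clean in response:
--             return bird
--
--     # If no exact match, try with display names
--     for bird_id, display_name in BIRD_DISPLAY_NAMES.items():
--         if display_name.lower() in response:
--             return bird_id
--
--     # Try with partial matches (just the actual bird name)
--     for bird in COMMON_BIRDS: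
--         bird_parts = bird.split('.')[-1].lower().replace('_', ' ')
--         if bird_parts in response:
--             return bird
--
--     return None
-- ===== SOURCE B (Python) =====
-- COMMON_BIRDS = [
--     "002.laysan_albatross", "012.yellow_headed_blackbird", "014.indigo_bunting",
--     "025.pelagic_cormorant", "029.american_crow", "033.yellow_billed_cuckoo",
--     "035.purple_finch", "042.vermilion_flycatcher", "048.european_goldfinch",
--     "050.eared_grebe", "059.california_gull", "068.ruby_throated_hummingbird",
--     "073.blue_jay", "081.pied_kingfisher", "095.baltimore_oriole",
--     "101.white_pelican", "106.horned_puffin", "108.white_necked_raven",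
--     "112.great_grey_shrike", "118.house_sparrow", "134.cape_glossy_starling",
--     "138.tree_swallow", "144.common_tern", "191.red_headed_woodpecker"
-- ]
--
-- BIRD_DISPLAY_NAMES = {
--     "002.laysan_albatross": "Laysan Albatross",
--     "012.yellow_headed_blackbird": "Yellow Headed Blackbird",
--     "014.indigo_bunting": "Indigo Bunting",
--     "025.pelagic_cormorant": "Pelagic Cormorant",
--     "029.american_crow": "American Crow",
--     "033.yellow_billed_cuckoo": "Yellow Billed Cuckoo",
--     "035.purple_finch": "Purple Finch",
--     "042.vermilion_flycatcher": "Vermilion Flycatcher",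
--     "048.european_goldfinch": "European Goldfinch",
--     "050.eared_grebe": "Eared Grebe",
--     "059.california_gull": "California Gull",
--     "068.ruby_throated_hummingbird": "Ruby Throated Hummingbird",
--     "073.blue_jay": "Blue Jay",
--     "081.pied_kingfisher": "Pied Kingfisher",
--     "095.baltimore_oriole": "Baltimore Oriole",
--     "101.white_pelican": "White Pelican",
--     "106.horned_puffin": "Horned Puffin",
--     "108.white_necked_raven": "White Necked Raven",
--     "112.great_grey_shrike": "Great Grey Shrike",
--     "118.house_sparrow": "House Sparrow",
--     "134.cape_glossy_starling": "Cape Glossy Starling",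
--     "138.tree_swallow": "Tree Swallow",
--     "144.common_tern": "Common Tern",
--     "191.red_headed_woodpecker": "Red Headed Woodpecker"
-- }
--
-- # One priority-ordered pattern table: all lowered bird IDs first, then all lowered
-- # display names.  A's third pass ("partial" names) is redundant: for every bird the
-- # partial pattern equals the lowered display name, so it can never fire.
-- _PATTERN_TABLE = (
--     [(b.lower(), b) for b in COMMON_BIRDS]
--     + [(dn.lower(), bid) for bid, dn in BIRD_DISPLAY_NAMES.items()]
-- )
--
-- def extract_bird_name(response):
--     """Extract the bird name from a response."""
--     if not response:
--         return None
--     response = response.lower()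
--     for pattern, result in _PATTERN_TABLE:
--         if pattern in response:
--             return result
--     return None
-- ===== Notes on version B (the rewrite author's own statement) =====
-- stated objective: simpler
-- what changed: Replaces A's three separate scans (IDs, display names, per-item recomputed partial names) by one precomputed priority-ordered (pattern, result) table and a single table-driven pass, after proving A's third scan is redundant (each partial pattern equals the lowered display name).
import Mathlib
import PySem

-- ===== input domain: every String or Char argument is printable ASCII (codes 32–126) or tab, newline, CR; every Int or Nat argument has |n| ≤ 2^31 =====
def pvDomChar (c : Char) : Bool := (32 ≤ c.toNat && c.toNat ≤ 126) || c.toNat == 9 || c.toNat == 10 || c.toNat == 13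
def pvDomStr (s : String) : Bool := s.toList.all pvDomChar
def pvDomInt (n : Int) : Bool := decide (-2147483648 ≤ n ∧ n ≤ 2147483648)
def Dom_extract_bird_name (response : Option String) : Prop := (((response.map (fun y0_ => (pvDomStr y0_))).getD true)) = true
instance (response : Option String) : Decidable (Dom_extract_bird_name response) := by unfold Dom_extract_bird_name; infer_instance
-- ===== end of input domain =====

-- B replaces A's three scans by one precomputed (pattern, result) table and a single pass (simpler; A's third scan is provably redundant).

-- ===== PORT A =====
def COMMON_BIRDS : List String := [
  "002.laysan_albatross", "012.yellow_headed_blackbird", "014.indigo_bunting",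
  "025.pelagic_cormorant", "029.american_crow", "033.yellow_billed_cuckoo",
  "035.purple_finch", "042.vermilion_flycatcher", "048.european_goldfinch",
  "050.eared_grebe", "059.california_gull", "068.ruby_throated_hummingbird",
  "073.blue_jay", "081.pied_kingfisher", "095.baltimore_oriole",
  "101.white_pelican", "106.horned_puffin", "108.white_necked_raven",
  "112.great_grey_shrike", "118.house_sparrow", "134.cape_glossy_starling",
  "138.tree_swallow", "144.common_tern", "191.red_headed_woodpecker"]

-- dict literal → association list in insertion order (keys are distinct)
def BIRD_DISPLAY_NAMES : List (String × String) := [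
  ("002.laysan_albatross", "Laysan Albatross"),
  ("012.yellow_headed_blackbird", "Yellow Headed Blackbird"),
  ("014.indigo_bunting", "Indigo Bunting"),
  ("025.pelagic_cormorant", "Pelagic Cormorant"),
  ("029.american_crow", "American Crow"),
  ("033.yellow_billed_cuckoo", "Yellow Billed Cuckoo"),
  ("035.purple_finch", "Purple Finch"),
  ("042.vermilion_flycatcher", "Vermilion Flycatcher"),
  ("048.european_goldfinch", "European Goldfinch"),
  ("050.eared_grebe", "Eared Grebe"),
  ("059.california_gull", "California Gull"),
  ("068.ruby_throated_hummingbird", "Ruby Throated Hummingbird"),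
  ("073.blue_jay", "Blue Jay"),
  ("081.pied_kingfisher", "Pied Kingfisher"),
  ("095.baltimore_oriole", "Baltimore Oriole"),
  ("101.white_pelican", "White Pelican"),
  ("106.horned_puffin", "Horned Puffin"),
  ("108.white_necked_raven", "White Necked Raven"),
  ("112.great_grey_shrike", "Great Grey Shrike"),
  ("118.house_sparrow", "House Sparrow"),
  ("134.cape_glossy_starling", "Cape Glossy Starling"),
  ("138.tree_swallow", "Tree Swallow"),
  ("144.common_tern", "Common Tern"),
  ("191.red_headed_woodpecker", "Red Headed Woodpecker")]

-- A's first loop: 'for bird in COMMON_BIRDS: bird_clean = bird.lower(); if bird_clean in response: return bird'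
def aLoop1 : List String → String → Option String
  | [], _ => none
  | bird :: rest, response =>
    let bird_clean := PySem.Str.lower bird
    if PySem.Str.isIn bird_clean response then some bird else aLoop1 rest response

-- A's second loop: 'for bird_id, display_name in BIRD_DISPLAY_NAMES.items(): if display_name.lower() in response: return bird_id'
def aLoop2 : List (String × String) → String → Option String
  | [], _ => none
  | (bird_id, display_name) :: rest, response =>
    if PySem.Str.isIn (PySem.Str.lower display_name) response then some bird_id else aLoop2 rest response

-- A's third loop: "bird.split('.')[-1].lower().replace('_',' ')"; split('.') is never empty, so [-1]'s
-- IndexError branch (pyGet? = none, defaulted to "") is unreachable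
def aPartial (bird : String) : String :=
  PySem.Str.replace (PySem.Str.lower (((PySem.List.pyGet? ((PySem.Str.split? bird ".").getD []) (-1))).getD "")) "_" " "

def aLoop3 : List String → String → Option String
  | [], _ => none
  | bird :: rest, response =>
    if PySem.Str.isIn (aPartial bird) response then some bird else aLoop3 rest response

def extract_bird_name (response : Option String) : Option String :=
  match response with
  | none => none
  | some s =>
    if s = "" then none  -- 'if not response'
    else
      let r := PySem.Str.lower s
      match aLoop1 COMMON_BIRDS r with
      | some bird => some bird
      | none =>
        match aLoop2 BIRD_DISPLAY_NAMES r with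
        | some bird_id => some bird_id
        | none => aLoop3 COMMON_BIRDS r

-- ===== PORT B =====
-- precomputed priority-ordered pattern table
def bTable : List (String × String) :=
  COMMON_BIRDS.map (fun b => (PySem.Str.lower b, b))
    ++ BIRD_DISPLAY_NAMES.map (fun p => (PySem.Str.lower p.2, p.1))

def bScan : List (String × String) → String → Option String
  | [], _ => none
  | (pattern, result) :: rest, response =>
    if PySem.Str.isIn pattern response then some result else bScan rest response

def extract_bird_name_alt (response : Option String) : Option String :=
  match response with
  | none => none
  | some s =>
    if s = "" then none
    else bScan bTable (PySem.Str.lower s)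

-- ===== PRECONDITION & SPEC =====
def Spec_extract_bird_name (response : Option String) (out : Option String) : Prop := out = extract_bird_name_alt response
instance (response : Option String) (out : Option String) : Decidable (Spec_extract_bird_name response out) := by unfold Spec_extract_bird_name; infer_instance

-- ===== CLAIM (what is proved, stated in full; the proofs are below) =====
def Claim_equal_extract_bird_name : Prop := ∀ (response : Option String), Dom_extract_bird_name response → Spec_extract_bird_name response (extract_bird_name response)

-- ===== LEMMAS AND PROOFS =====

theorem bScan_append (t1 t2 : List (String × String)) (r : String) :
    bScan (t1 ++ t2) r = ((bScan t1 r).orElse (fun _ => bScan t2 r)) := by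
  induction t1 with
  | nil => simp [bScan]
  | cons p rest ih => obtain ⟨pat, res⟩ := p; simp [bScan]; split_ifs <;> simp [ih]

theorem aLoop1_eq_bScan (bs : List String) (r : String) :
    aLoop1 bs r = bScan (bs.map (fun b => (PySem.Str.lower b, b))) r := by
  induction bs with
  | nil => rfl
  | cons b rest ih => simp [aLoop1, bScan, ih]

theorem aLoop2_eq_bScan (ps : List (String × String)) (r : String) :
    aLoop2 ps r = bScan (ps.map (fun p => (PySem.Str.lower p.2, p.1))) r := by
  induction ps with
  | nil => rfl
  | cons p rest ih => obtain ⟨k, v⟩ := p; simp [aLoop2, bScan, ih]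

theorem aLoop3_eq_bScan (bs : List String) (r : String) :
    aLoop3 bs r = bScan (bs.map (fun b => (aPartial b, b))) r := by
  induction bs with
  | nil => rfl
  | cons b rest ih => simp [aLoop3, bScan, ih]

-- the redundancy of A's third pass: its pattern table is literally A's second pattern table
theorem tables_eq :
    COMMON_BIRDS.map (fun b => (aPartial b, b))
      = BIRD_DISPLAY_NAMES.map (fun p => (PySem.Str.lower p.2, p.1)) := by decide

-- ===== VERDICT (by name: the statement is the Claim_ definition above) =====
theorem extract_bird_name_spec : Claim_equal_extract_bird_name := by
  intro response _
  unfold Spec_extract_bird_name extract_bird_name extract_bird_name_alt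
  cases response with
  | none => rfl
  | some s =>
    by_cases hs : s = ""
    · simp [hs]
    · simp only [hs, if_false]
      rw [bTable, bScan_append, ← aLoop1_eq_bScan, ← aLoop2_eq_bScan,
        aLoop3_eq_bScan, tables_eq, ← aLoop2_eq_bScan]
      cases h1 : aLoop1 COMMON_BIRDS (PySem.Str.lower s) <;>
        cases h2 : aLoop2 BIRD_DISPLAY_NAMES (PySem.Str.lower s) <;>
        simp [h1, h2, Option.orElse]
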